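-- pv_equiv track=rewrite | github.com/cqfr/experiment | data/utils.py | _ensure_minimum_samples
-- ===== SOURCE A (Python) =====
-- from typing import List, Literal, Tuple
--
-- def _ensure_minimum_samples(client_indices: List[List[int]], min_samples_per_client: int) -> bool:
--     """Repair small-client tails by moving surplus samples from large clients."""
--
--     deficits = [idx for idx, samples in enumerate(client_indices) if len(samples) < min_samples_per_client]
--     if not deficits:
--         return True
--
--     donors = [idx for idx, samples in enumerate(client_indices) if len(samples) > min_samples_per_client]
--     donor_ptr = 0
--
--     for client_id in deficits:
--         needed = min_samples_per_client - len(client_indices[client_id])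
--         while needed > 0:
--             while donor_ptr < len(donors) and len(client_indices[donors[donor_ptr]]) <= min_samples_per_client:
--                 donor_ptr += 1
--             if donor_ptr >= len(donors):
--                 return False
--
--             donor_id = donors[donor_ptr]
--             moved_index = client_indices[donor_id].pop()
--             client_indices[client_id].append(moved_index)
--             needed -= 1
--
--     return min(len(samples) for samples in client_indices) >= min_samples_per_client
-- ===== SOURCE B (Python) =====
-- def _ensure_minimum_samples(client_indices, min_samples_per_client):
--     # Return-value equivalent to A; B does not mutate client_indices.
--     need = sum(min_samples_per_client - len(s)
--                for s in client_indices if len(s) < min_samples_per_client)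
--     if need == 0:
--         return True
--     have = sum(len(s) - min_samples_per_client
--                for s in client_indices if len(s) > min_samples_per_client)
--     return have >= need
-- ===== Notes on version B (the rewrite author's own statement) =====
-- stated objective: simpler
-- what changed: A simulates the rebalancing (donor pointer, element-by-element pops/appends into the lists, final min scan); B just computes the total deficit and total surplus in two arithmetic passes and returns deficit==0 or surplus>=deficit, without mutating the input.
import Mathlib
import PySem

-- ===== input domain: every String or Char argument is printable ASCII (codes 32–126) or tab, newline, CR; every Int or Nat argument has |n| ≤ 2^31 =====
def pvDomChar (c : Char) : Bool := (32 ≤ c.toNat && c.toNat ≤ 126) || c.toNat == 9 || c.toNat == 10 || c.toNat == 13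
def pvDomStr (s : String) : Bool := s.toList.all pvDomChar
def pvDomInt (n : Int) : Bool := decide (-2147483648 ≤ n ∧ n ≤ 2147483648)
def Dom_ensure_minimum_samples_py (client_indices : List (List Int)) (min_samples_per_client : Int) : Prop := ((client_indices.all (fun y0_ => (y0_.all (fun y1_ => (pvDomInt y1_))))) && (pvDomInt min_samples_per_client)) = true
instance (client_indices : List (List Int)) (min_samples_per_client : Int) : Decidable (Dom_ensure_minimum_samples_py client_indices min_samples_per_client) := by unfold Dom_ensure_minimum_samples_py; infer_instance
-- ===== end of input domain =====

-- B replaces A's mutating simulation by two arithmetic passes (total deficit / total surplus); the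
-- equivalence proved here is about the RETURN value only: A mutates client_indices in place, B does not.

-- ===== PORT A =====
-- inner `while donor_ptr < len(donors) and len(...) <= min:` loop
def advancePtr (s : List (List Int)) (donors : List Nat) (m : Int) : Nat → Nat → Nat
  | 0, p => p
  | f + 1, p =>
    if p < donors.length ∧ ((s.getD (donors.getD p 0) []).length : Int) ≤ m then
      advancePtr s donors m f (p + 1)
    else p

-- `while needed > 0:` loop of A, fuel = needed (each iteration moves one sample or returns False)
def transfer (m : Int) (donors : List Nat) (cid : Nat) :
    Nat → List (List Int) → Nat → Option (List (List Int) × Nat)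
  | 0, s, p => some (s, p)
  | k + 1, s, p =>
    let p' := advancePtr s donors m (donors.length - p) p
    if p' < donors.length then
      let did := donors.getD p' 0
      let dl := s.getD did []
      let moved := dl.getLast?.getD 0          -- .pop(): list is never empty when A runs (len > min ≥ 1)
      let s1 := s.set did dl.dropLast
      let s2 := s1.set cid ((s1.getD cid []) ++ [moved])
      transfer m donors cid k s2 p'
    else none

-- `for client_id in deficits:` loop of A; none = `return False`
def outerLoop (m : Int) (donors : List Nat) :
    List Nat → List (List Int) → Nat → Option (List (List Int) × Nat)
  | [], s, p => some (s, p)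
  | cid :: rest, s, p =>
    let needed := m - ((s.getD cid []).length : Int)
    match transfer m donors cid needed.toNat s p with
    | none => none
    | some (s', p') => outerLoop m donors rest s' p'

def ensure_minimum_samples_py (client_indices : List (List Int)) (min_samples_per_client : Int) : Bool :=
  if ((List.range client_indices.length).filter
      (fun i => decide (((client_indices.getD i []).length : Int) < min_samples_per_client))).isEmpty
  then true
  else
    match outerLoop min_samples_per_client
        ((List.range client_indices.length).filter
          (fun i => decide (min_samples_per_client < ((client_indices.getD i []).length : Int))))
        ((List.range client_indices.length).filter
          (fun i => decide (((client_indices.getD i []).length : Int) < min_samples_per_client)))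
        client_indices 0 with
    | none => false
    | some (s, _) =>
      match (s.map (fun l => (l.length : Int))).min? with
      | some mn => decide (min_samples_per_client ≤ mn)
      | none => false

-- ===== PORT B =====
def ensure_minimum_samples_py_alt (client_indices : List (List Int)) (min_samples_per_client : Int) : Bool :=
  if ((client_indices.filter (fun s => decide ((s.length : Int) < min_samples_per_client))).map
      (fun s => min_samples_per_client - (s.length : Int))).sum = 0
  then true
  else
    decide (((client_indices.filter (fun s => decide ((s.length : Int) < min_samples_per_client))).map
        (fun s => min_samples_per_client - (s.length : Int))).sum ≤
      ((client_indices.filter (fun s => decide (min_samples_per_client < (s.length : Int)))).map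
        (fun s => (s.length : Int) - min_samples_per_client)).sum)

-- ===== PRECONDITION & SPEC =====
def Spec_ensure_minimum_samples_py (client_indices : List (List Int)) (min_samples_per_client : Int) (out : Bool) : Prop := out = ensure_minimum_samples_py_alt client_indices min_samples_per_client
instance (client_indices : List (List Int)) (min_samples_per_client : Int) (out : Bool) : Decidable (Spec_ensure_minimum_samples_py client_indices min_samples_per_client out) := by unfold Spec_ensure_minimum_samples_py; infer_instance

-- ===== CLAIM (what is proved, stated in full; the proofs are below) =====
def Claim_equal_ensure_minimum_samples_py : Prop := ∀ (client_indices : List (List Int)) (min_samples_per_client : Int), Dom_ensure_minimum_samples_py client_indices min_samples_per_client → Spec_ensure_minimum_samples_py client_indices min_samples_per_client (ensure_minimum_samples_py client_indices min_samples_per_client)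

-- ===== LEMMAS AND PROOFS =====

def lenI (s : List (List Int)) (i : Nat) : Int := ((s.getD i []).length : Int)

def avail (m : Int) (donors : List Nat) (s : List (List Int)) (p : Nat) : Int :=
  ((donors.drop p).map (fun i => lenI s i - m)).sum

def GInv (m : Int) (donors : List Nat) (s : List (List Int)) : Prop :=
  ∀ i ∈ donors, m ≤ lenI s i

theorem getD_set_ne {α : Type} (l : List α) (i j : Nat) (a d : α) (h : i ≠ j) :
    (l.set j a).getD i d = l.getD i d := by
  simp [List.getD_eq_getElem?_getD, List.getElem?_set_ne (by omega : j ≠ i)]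

theorem getD_set_self {α : Type} (l : List α) (j : Nat) (a d : α) (h : j < l.length) :
    (l.set j a).getD j d = a := by
  simp [List.getD_eq_getElem?_getD, h]

theorem getD_mem (donors : List Nat) (j : Nat) (h : j < donors.length) :
    donors.getD j 0 ∈ donors := by
  rw [List.getD_eq_getElem donors 0 h]; exact List.getElem_mem h

theorem avail_succ (m : Int) (donors : List Nat) (s : List (List Int)) (p : Nat)
    (h : p < donors.length) :
    avail m donors s p = (lenI s (donors.getD p 0) - m) + avail m donors s (p + 1) := by
  unfold avail
  rw [List.drop_eq_getElem_cons h, List.getD_eq_getElem donors 0 h]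
  rw [List.map_cons, List.sum_cons]

theorem avail_nonneg (m : Int) (donors : List Nat) (s : List (List Int)) (p : Nat)
    (hG : GInv m donors s) : 0 ≤ avail m donors s p := by
  apply List.sum_nonneg
  intro x hx
  obtain ⟨i, hi, rfl⟩ := List.mem_map.mp hx
  have := hG i (List.mem_of_mem_drop hi)
  omega

theorem advance_spec (s : List (List Int)) (donors : List Nat) (m : Int) :
    ∀ (f p : Nat), donors.length ≤ f + p → p ≤ donors.length →
    p ≤ advancePtr s donors m f p ∧ advancePtr s donors m f p ≤ donors.length ∧
    (∀ j, p ≤ j → j < advancePtr s donors m f p → lenI s (donors.getD j 0) ≤ m) ∧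
    (advancePtr s donors m f p < donors.length →
      m < lenI s (donors.getD (advancePtr s donors m f p) 0)) := by
  intro f
  induction f with
  | zero =>
    intro p hf hp
    have : p = donors.length := by omega
    refine ⟨le_refl _, by simp [advancePtr, this], ?_, ?_⟩ <;> simp only [advancePtr] <;> omega
  | succ f ih =>
    intro p hf hp
    by_cases hc : p < donors.length ∧ ((s.getD (donors.getD p 0) []).length : Int) ≤ m
    · have heq : advancePtr s donors m (f + 1) p = advancePtr s donors m f (p + 1) := by
        rw [advancePtr, if_pos hc]
      obtain ⟨h1, h2, h3, h4⟩ := ih (p + 1) (by omega) (by omega)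
      refine ⟨by omega, by rw [heq]; exact h2, ?_, by rw [heq]; exact h4⟩
      intro j hj1 hj2
      rcases Nat.eq_or_lt_of_le hj1 with rfl | hlt
      · exact hc.2
      · exact h3 j hlt (by rwa [heq] at hj2)
    · have heq : advancePtr s donors m (f + 1) p = p := by rw [advancePtr, if_neg hc]
      rw [heq]
      refine ⟨le_refl _, hp, by omega, ?_⟩
      intro hlt
      rw [not_and_or] at hc
      rcases hc with h | h
      · omega
      · unfold lenI; omega

theorem avail_advance (m : Int) (donors : List Nat) (s : List (List Int))
    (hG : GInv m donors s) :
    ∀ (f p : Nat), donors.length ≤ f + p → p ≤ donors.length →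
    avail m donors s (advancePtr s donors m f p) = avail m donors s p := by
  intro f
  induction f with
  | zero => intro p _ _; simp [advancePtr]
  | succ f ih =>
    intro p hf hp
    by_cases hc : p < donors.length ∧ ((s.getD (donors.getD p 0) []).length : Int) ≤ m
    · have heq : advancePtr s donors m (f + 1) p = advancePtr s donors m f (p + 1) := by
        rw [advancePtr, if_pos hc]
      rw [heq, ih (p + 1) (by omega) (by omega), avail_succ m donors s p hc.1]
      have hmem := getD_mem donors p hc.1
      have := hG _ hmem
      have : lenI s (donors.getD p 0) = m := by unfold lenI at *; omega
      rw [this]; ring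
    · rw [advancePtr, if_neg hc]

theorem avail_last (m : Int) (donors : List Nat) (s : List (List Int)) :
    avail m donors s donors.length = 0 := by simp [avail]

theorem drop_ne_head (donors : List Nat) (hnd : donors.Nodup) (q : Nat) (hq : q < donors.length)
    (i : Nat) (hi : i ∈ donors.drop (q + 1)) : i ≠ donors.getD q 0 := by
  rw [List.getD_eq_getElem donors 0 hq]
  intro heq
  have hdisj : (donors.take (q + 1)).Disjoint (donors.drop (q + 1)) := by
    have h2 := hnd
    rw [← List.take_append_drop (q + 1) donors] at h2
    exact List.disjoint_of_nodup_append h2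
  have htake : donors[q] ∈ donors.take (q + 1) :=
    List.mem_take_iff_getElem.mpr ⟨q, by omega, by simp⟩
  exact hdisj htake (heq ▸ hi)

theorem transfer_spec (m : Int) (donors : List Nat) (cid : Nat)
    (hm : 0 ≤ m) (hnd : donors.Nodup) (hcid : cid ∉ donors) :
    ∀ (k : Nat) (s : List (List Int)) (p : Nat),
    GInv m donors s → p ≤ donors.length → (∀ i ∈ donors, i < s.length) → cid < s.length →
    (((k : Int) ≤ avail m donors s p →
      ∃ s' p', transfer m donors cid k s p = some (s', p') ∧
        GInv m donors s' ∧ p' ≤ donors.length ∧ s'.length = s.length ∧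
        avail m donors s' p' = avail m donors s p - k ∧
        lenI s' cid = lenI s cid + k ∧
        (∀ i, i ≠ cid → i ∉ donors → s'.getD i [] = s.getD i [])) ∧
    (avail m donors s p < (k : Int) → transfer m donors cid k s p = none)) := by
  intro k
  induction k with
  | zero =>
    intro s p hG hp hb hc
    constructor
    · intro _
      exact ⟨s, p, rfl, hG, hp, rfl, by simp, by simp, fun _ _ _ => rfl⟩
    · intro hlt
      exact absurd (avail_nonneg m donors s p hG) (by push_cast at hlt; omega)
  | succ k ih =>
    intro s p hG hp hb hc
    obtain ⟨ha1, ha2, _, ha4⟩ :=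
      advance_spec s donors m (donors.length - p) p (by omega) hp
    have havp := avail_advance m donors s hG (donors.length - p) p (by omega) hp
    set p' := advancePtr s donors m (donors.length - p) p with hp'def
    by_cases hlt : p' < donors.length
    · -- one sample is moved, then recurse
      have hdgt : m < lenI s (donors.getD p' 0) := ha4 hlt
      set did := donors.getD p' 0 with hdid
      have hdidmem : did ∈ donors := getD_mem donors p' hlt
      have hne : did ≠ cid := fun h => hcid (h ▸ hdidmem)
      have hdlen : did < s.length := hb did hdidmem
      set dl := s.getD did [] with hdl
      have hdlpos : 1 ≤ dl.length := by
        have h := hdgt; unfold lenI at h; rw [← hdl] at h; omega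
      set s1 := s.set did dl.dropLast with hs1
      set s2 := s1.set cid ((s1.getD cid []) ++ [dl.getLast?.getD 0]) with hs2
      have hlen2 : s2.length = s.length := by simp [hs2, hs1]
      have hgd_cid : s2.getD cid [] = s.getD cid [] ++ [dl.getLast?.getD 0] := by
        rw [hs2, getD_set_self _ _ _ _ (by simp [hs1]; omega),
            hs1, getD_set_ne _ _ _ _ _ (Ne.symm hne)]
      have hgd_did : s2.getD did [] = dl.dropLast := by
        rw [hs2, getD_set_ne _ _ _ _ _ hne, hs1, getD_set_self _ _ _ _ hdlen]
      have hgd_other : ∀ i, i ≠ cid → i ≠ did → s2.getD i [] = s.getD i [] := by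
        intro i h1 h2
        rw [hs2, getD_set_ne _ _ _ _ _ h1, hs1, getD_set_ne _ _ _ _ _ h2]
      have hlen_cid : lenI s2 cid = lenI s cid + 1 := by
        unfold lenI; rw [hgd_cid]; simp
      have hlen_did : lenI s2 did = lenI s did - 1 := by
        unfold lenI; rw [hgd_did, ← hdl, List.length_dropLast]; omega
      have hG2 : GInv m donors s2 := by
        intro i hi
        by_cases h2 : i = did
        · subst h2; rw [hlen_did]; omega
        · have h1 : i ≠ cid := fun h => hcid (h ▸ hi)
          unfold lenI; rw [hgd_other i h1 h2]; exact hG i hi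
      have hav2 : avail m donors s2 p' = avail m donors s p' - 1 := by
        rw [avail_succ m donors s2 p' hlt, avail_succ m donors s p' hlt]
        have hrest : ((donors.drop (p' + 1)).map (fun i => lenI s2 i - m)) =
            ((donors.drop (p' + 1)).map (fun i => lenI s i - m)) := by
          apply List.map_congr_left
          intro i hi
          have h2 : i ≠ did := drop_ne_head donors hnd p' hlt i hi
          have h1 : i ≠ cid := fun h => hcid (h ▸ List.mem_of_mem_drop hi)
          unfold lenI; rw [hgd_other i h1 h2]
        unfold avail
        rw [hrest, ← hdid, hlen_did]
        ring
      have hb2 : ∀ i ∈ donors, i < s2.length := fun i hi => hlen2 ▸ hb i hi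
      have hc2 : cid < s2.length := hlen2 ▸ hc
      obtain ⟨ih1, ih2⟩ := ih s2 p' hG2 (by omega) hb2 hc2
      have hstep : transfer m donors cid (k + 1) s p = transfer m donors cid k s2 p' := by
        rw [transfer, ← hp'def]
        simp only [hlt, if_true]
        rfl
      constructor
      · intro hge
        have : (k : Int) ≤ avail m donors s2 p' := by
          rw [hav2, havp]; push_cast at hge ⊢; omega
        obtain ⟨s', p'', heq, hG', hple', hlen', hav', hcid', hoth'⟩ := ih1 this
        refine ⟨s', p'', by rw [hstep]; exact heq, hG', hple', by omega, ?_, ?_, ?_⟩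
        · rw [hav', hav2, havp]; push_cast; ring
        · rw [hcid', hlen_cid]; push_cast; ring
        · intro i h1 h2
          rw [hoth' i h1 h2, hgd_other i h1 (fun h => h2 (h ▸ hdidmem))]
      · intro hlt2
        rw [hstep]
        apply ih2
        rw [hav2, havp]; push_cast at hlt2 ⊢; omega
    · -- donors exhausted: return False
      have hpeq : p' = donors.length := by omega
      have hav0 : avail m donors s p = 0 := by
        rw [← havp, hpeq, avail_last]
      have hnone : transfer m donors cid (k + 1) s p = none := by
        rw [transfer, ← hp'def]
        simp only [hlt, if_false]
      constructor
      · intro hge; rw [hav0] at hge; push_cast at hge; omega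
      · intro _; exact hnone

theorem sum_pos_int {l : List Int} (h : ∀ x ∈ l, 0 < x) (hne : l ≠ []) : 0 < l.sum := by
  cases l with
  | nil => exact absurd rfl hne
  | cons x t =>
    simp only [List.sum_cons]
    have hx := h x (List.mem_cons_self)
    have ht : 0 ≤ t.sum := List.sum_nonneg (fun y hy => le_of_lt (h y (List.mem_cons_of_mem x hy)))
    omega

theorem outer_spec (m : Int) (donors : List Nat) (hm : 0 ≤ m) (hnd : donors.Nodup) :
    ∀ (ds : List Nat) (s : List (List Int)) (p : Nat),
    GInv m donors s → p ≤ donors.length → (∀ i ∈ donors, i < s.length) →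
    ds.Nodup → (∀ c ∈ ds, c ∉ donors ∧ c < s.length ∧ lenI s c < m) →
    (((ds.map (fun c => m - lenI s c)).sum ≤ avail m donors s p →
      ∃ s' p', outerLoop m donors ds s p = some (s', p') ∧
        GInv m donors s' ∧ s'.length = s.length ∧
        (∀ c ∈ ds, lenI s' c = m) ∧
        (∀ i, i ∉ donors → i ∉ ds → s'.getD i [] = s.getD i [])) ∧
    (avail m donors s p < (ds.map (fun c => m - lenI s c)).sum →
      outerLoop m donors ds s p = none)) := by
  intro ds
  induction ds with
  | nil =>
    intro s p hG hp hb _ _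
    constructor
    · intro _
      exact ⟨s, p, rfl, hG, rfl, by simp, fun _ _ _ => rfl⟩
    · intro hlt
      exact absurd (avail_nonneg m donors s p hG) (by simp at hlt; omega)
  | cons cid rest ih =>
    intro s p hG hp hb hnodup hds
    obtain ⟨hcid_nd, hcid_lt, hcid_def⟩ := hds cid (List.mem_cons_self)
    have hrest_nd : rest.Nodup := (List.nodup_cons.mp hnodup).2
    have hcid_rest : cid ∉ rest := (List.nodup_cons.mp hnodup).1
    set needed := m - lenI s cid with hneed
    have hneed_pos : 0 < needed := by omega
    have hktoi : ((needed.toNat : Int)) = needed := Int.toNat_of_nonneg (by omega)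
    have hNrest_nonneg : 0 ≤ (rest.map (fun c => m - lenI s c)).sum := by
      apply List.sum_nonneg
      intro x hx
      obtain ⟨c, hcmem, rfl⟩ := List.mem_map.mp hx
      have := (hds c (List.mem_cons_of_mem cid hcmem)).2.2
      omega
    have hsum : ((cid :: rest).map (fun c => m - lenI s c)).sum =
        needed + (rest.map (fun c => m - lenI s c)).sum := by simp [hneed]
    obtain ⟨ht1, ht2⟩ := transfer_spec m donors cid hm hnd hcid_nd needed.toNat s p hG hp hb hcid_lt
    have hstep : outerLoop m donors (cid :: rest) s p =
        match transfer m donors cid (m - ((s.getD cid []).length : Int)).toNat s p with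
        | none => none
        | some (s', p') => outerLoop m donors rest s' p' := rfl
    have hneedeq : (m - ((s.getD cid []).length : Int)) = needed := rfl
    by_cases hfirst : (needed.toNat : Int) ≤ avail m donors s p
    · obtain ⟨s1, p1, heq1, hG1, hp1, hlen1, hav1, hcid1, hoth1⟩ := ht1 hfirst
      have hrest_same : ∀ c ∈ rest, lenI s1 c = lenI s c := by
        intro c hcmem
        have hcd := hds c (List.mem_cons_of_mem cid hcmem)
        have hne : c ≠ cid := fun h => hcid_rest (h ▸ hcmem)
        unfold lenI; rw [hoth1 c hne hcd.1]
      have hNrest_eq : (rest.map (fun c => m - lenI s1 c)).sum =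
          (rest.map (fun c => m - lenI s c)).sum := by
        congr 1
        apply List.map_congr_left
        intro c hcmem
        rw [hrest_same c hcmem]
      have hds1 : ∀ c ∈ rest, c ∉ donors ∧ c < s1.length ∧ lenI s1 c < m := by
        intro c hcmem
        have hcd := hds c (List.mem_cons_of_mem cid hcmem)
        exact ⟨hcd.1, by omega, by rw [hrest_same c hcmem]; exact hcd.2.2⟩
      obtain ⟨ihA, ihB⟩ := ih s1 p1 hG1 hp1 (fun i hi => hlen1 ▸ hb i hi) hrest_nd hds1
      rw [hstep, hneedeq, heq1]
      constructor
      · intro hge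
        rw [hsum] at hge
        have : (rest.map (fun c => m - lenI s1 c)).sum ≤ avail m donors s1 p1 := by
          rw [hNrest_eq, hav1, hktoi]; omega
        obtain ⟨s', p', heq', hG', hlen', hdone', hoth'⟩ := ihA this
        refine ⟨s', p', heq', hG', by omega, ?_, ?_⟩
        · intro c hcmem
          rcases List.mem_cons.mp hcmem with rfl | hcr
          · have : s'.getD c [] = s1.getD c [] := hoth' c hcid_nd hcid_rest
            unfold lenI at *
            rw [this]; rw [hcid1, hktoi]; omega
          · exact hdone' c hcr
        · intro i h1 h2
          have hne_cid : i ≠ cid := fun h => h2 (h ▸ List.mem_cons_self)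
          have hni_rest : i ∉ rest := fun h => h2 (List.mem_cons_of_mem cid h)
          rw [hoth' i h1 hni_rest, hoth1 i hne_cid h1]
      · intro hlt
        rw [hsum] at hlt
        apply ihB
        rw [hNrest_eq, hav1, hktoi]; omega
    · have hnone := ht2 (by omega)
      rw [hstep, hneedeq, hnone]
      have hlt : avail m donors s p < ((cid :: rest).map (fun c => m - lenI s c)).sum := by
        rw [hsum]; omega
      exact ⟨fun hge => absurd hge (by omega), fun _ => rfl⟩

theorem map_getD_filter_range {α : Type} (p : α → Bool) (d : α) :
    ∀ (ci : List α),
    (((List.range ci.length).filter (fun i => p (ci.getD i d))).map (fun i => ci.getD i d)) =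
      ci.filter p := by
  intro ci
  induction ci with
  | nil => simp
  | cons x t ih =>
    by_cases hx : p x <;>
      simp [List.range_succ_eq_map, List.filter_map, List.map_map, Function.comp_def, hx, ← ih]

-- ===== VERDICT (by name: the statement is the Claim_ definition above) =====
theorem ensure_minimum_samples_py_spec : Claim_equal_ensure_minimum_samples_py := by
  intro ci m _
  unfold Spec_ensure_minimum_samples_py
  unfold ensure_minimum_samples_py ensure_minimum_samples_py_alt
  set Pdef : List Int → Bool := fun s => decide ((s.length : Int) < m) with hPdef
  set Pdon : List Int → Bool := fun s => decide (m < (s.length : Int)) with hPdon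
  set deficits := (List.range ci.length).filter (fun i => decide (((ci.getD i []).length : Int) < m)) with hdefs
  set donors := (List.range ci.length).filter (fun i => decide (m < ((ci.getD i []).length : Int))) with hdons
  have hdef_eq : deficits.map (fun i => ci.getD i []) = ci.filter Pdef :=
    map_getD_filter_range Pdef [] ci
  have hdon_eq : donors.map (fun i => ci.getD i []) = ci.filter Pdon :=
    map_getD_filter_range Pdon [] ci
  have hneed : ((ci.filter Pdef).map (fun s => m - (s.length : Int))).sum =
      (deficits.map (fun c => m - lenI ci c)).sum := by
    rw [← hdef_eq, List.map_map]; rfl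
  have hsurp : ((ci.filter Pdon).map (fun s => (s.length : Int) - m)).sum =
      (donors.map (fun c => lenI ci c - m)).sum := by
    rw [← hdon_eq, List.map_map]; rfl
  have havail0 : avail m donors ci 0 = (donors.map (fun c => lenI ci c - m)).sum := by
    simp [avail]
  by_cases hempty : deficits.isEmpty
  · -- no deficit clients: both return True
    have hnil : deficits = [] := List.isEmpty_iff.mp hempty
    have hfnil : ci.filter Pdef = [] := by rw [← hdef_eq, hnil]; rfl
    have h0 : ((ci.filter Pdef).map (fun s => m - (s.length : Int))).sum = 0 := by
      rw [hfnil]; rfl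
    rw [if_pos hempty, h0]
    simp
  · simp only [hempty]
    have hnil : deficits ≠ [] := fun h => hempty (by simp [h])
    -- min_samples_per_client is positive (some client has fewer samples)
    obtain ⟨c0, hc0⟩ := List.exists_mem_of_ne_nil deficits hnil
    have hc0f := List.mem_filter.mp (hdefs ▸ hc0)
    have hm : 0 ≤ m := by
      have := of_decide_eq_true hc0f.2
      have : (0 : Int) ≤ ((ci.getD c0 []).length : Int) := by positivity
      omega
    have hterm_pos : ∀ x ∈ deficits.map (fun c => m - lenI ci c), 0 < x := by
      intro x hx
      obtain ⟨c, hcmem, rfl⟩ := List.mem_map.mp hx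
      have hcf := List.mem_filter.mp (hdefs ▸ hcmem)
      have := of_decide_eq_true hcf.2
      unfold lenI; omega
    have hneed_pos : 0 < (deficits.map (fun c => m - lenI ci c)).sum :=
      sum_pos_int hterm_pos (by simp [hnil])
    have hneed_ne : ((ci.filter Pdef).map (fun s => m - (s.length : Int))).sum ≠ 0 := by
      rw [hneed]; omega
    simp only [hneed_ne, if_false]
    -- set up outer_spec
    have hnd : donors.Nodup := List.Nodup.filter _ (List.nodup_range)
    have hdefnd : deficits.Nodup := List.Nodup.filter _ (List.nodup_range)
    have hG : GInv m donors ci := by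
      intro i hi
      have hif := List.mem_filter.mp (hdons ▸ hi)
      have := of_decide_eq_true hif.2
      unfold lenI; omega
    have hb : ∀ i ∈ donors, i < ci.length := by
      intro i hi
      exact List.mem_range.mp (List.mem_filter.mp (hdons ▸ hi)).1
    have hds : ∀ c ∈ deficits, c ∉ donors ∧ c < ci.length ∧ lenI ci c < m := by
      intro c hcmem
      have hcf := List.mem_filter.mp (hdefs ▸ hcmem)
      have hclt := of_decide_eq_true hcf.2
      refine ⟨?_, List.mem_range.mp hcf.1, hclt⟩
      intro hcd
      have hcd' : c ∈ List.filter (fun i => decide (m < ((ci.getD i []).length : Int)))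
          (List.range ci.length) := hdons ▸ hcd
      have := of_decide_eq_true (List.mem_filter.mp hcd').2
      omega
    obtain ⟨hA, hB⟩ := outer_spec m donors hm hnd deficits ci 0 hG (by omega) hb hdefnd hds
    by_cases hok : (deficits.map (fun c => m - lenI ci c)).sum ≤ avail m donors ci 0
    · -- success: A reaches the final min check, which is true
      obtain ⟨s', p', heq, hG', hlen', hdone', hoth'⟩ := hA hok
      rw [heq]
      have hall : ∀ l ∈ s', m ≤ (l.length : Int) := by
        intro l hl
        obtain ⟨j, hj, rfl⟩ := List.getElem_of_mem hl
        have hj2 : j < ci.length := by omega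
        have hgd : s'.getD j [] = s'[j] := List.getD_eq_getElem s' [] hj
        by_cases hd1 : ((ci.getD j []).length : Int) < m
        · have hjm : j ∈ deficits := by
            rw [hdefs]
            exact List.mem_filter.mpr ⟨List.mem_range.mpr hj2, decide_eq_true hd1⟩
          have := hdone' j hjm
          unfold lenI at this; rw [hgd] at this; omega
        · by_cases hd2 : m < ((ci.getD j []).length : Int)
          · have hjm : j ∈ donors := by
              rw [hdons]
              exact List.mem_filter.mpr ⟨List.mem_range.mpr hj2, decide_eq_true hd2⟩
            have := hG' j hjm
            unfold lenI at this; rw [hgd] at this; omega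
          · have hjd : j ∉ donors := by
              intro hjd
              have hjd' : j ∈ List.filter (fun i => decide (m < ((ci.getD i []).length : Int)))
                  (List.range ci.length) := hdons ▸ hjd
              exact hd2 (of_decide_eq_true (List.mem_filter.mp hjd').2)
            have hjf : j ∉ deficits := by
              intro hjf
              have hjf' : j ∈ List.filter (fun i => decide (((ci.getD i []).length : Int) < m))
                  (List.range ci.length) := hdefs ▸ hjf
              exact hd1 (of_decide_eq_true (List.mem_filter.mp hjf').2)
            have := hoth' j hjd hjf
            rw [hgd] at this; rw [this]
            omega
      have hne' : s' ≠ [] := by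
        intro h
        rw [h] at hlen'
        simp at hlen'
        rw [← hlen'] at hc0f
        have := List.mem_range.mp hc0f.1
        omega
      show (match (s'.map (fun l => (l.length : Int))).min? with
            | some mn => decide (m ≤ mn)
            | none => false) = _
      cases hmin : (s'.map (fun l => (l.length : Int))).min? with
      | none =>
        exfalso
        rw [List.min?_eq_none_iff] at hmin
        exact hne' (by simpa using hmin)
      | some mn =>
        have hmem := List.min?_mem hmin
        obtain ⟨l, hl, rfl⟩ := List.mem_map.mp hmem
        have h1 : m ≤ (l.length : Int) := hall l hl
        show decide (m ≤ (l.length : Int)) = _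
        rw [decide_eq_true h1]
        symm
        rw [decide_eq_true_eq]
        rw [hneed, hsurp, ← havail0]
        omega
    · -- failure: both return False
      have hlt : avail m donors ci 0 < (deficits.map (fun c => m - lenI ci c)).sum := by omega
      rw [hB hlt]
      show false = _
      symm
      rw [decide_eq_false_iff_not, hneed, hsurp, ← havail0]
      omega
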